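-- pv_equiv track=rewrite | github.com/lizhicq/Algorithms-Manual | Leetcode/leetcode.py | powerJump
-- ===== SOURCE A (Python) =====
-- def powerJump(game):
--
--     tar = game[-1]
--     dis = 0
--     start = -1
--     power = 1
--     for i, ch in enumerate(game):
--         if ch == tar:
--             dis = i - start
--             start = i
--             power = max(power, dis)
--         else:
--             pass
--     return power
-- ===== SOURCE B (Python) =====
-- def powerJump(game):
--     tar = game[-1]
--     positions = [i for i, ch in enumerate(game) if ch == tar]
--     best = 0
--     for prev, cur in zip([-1] + positions, positions):
--         best = max(best, cur - prev)
--     return best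
-- ===== Notes on version B (the rewrite author's own statement) =====
-- stated objective: alternative
-- what changed: Replaces A's single stateful scan carrying (dis, start, power) by a two-phase decomposition: first collect all indices where the char equals the last char, then take the maximum consecutive difference over the positions list prepended with -1 (the initial power=1 is subsumed because every gap is at least 1).
import Mathlib
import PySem

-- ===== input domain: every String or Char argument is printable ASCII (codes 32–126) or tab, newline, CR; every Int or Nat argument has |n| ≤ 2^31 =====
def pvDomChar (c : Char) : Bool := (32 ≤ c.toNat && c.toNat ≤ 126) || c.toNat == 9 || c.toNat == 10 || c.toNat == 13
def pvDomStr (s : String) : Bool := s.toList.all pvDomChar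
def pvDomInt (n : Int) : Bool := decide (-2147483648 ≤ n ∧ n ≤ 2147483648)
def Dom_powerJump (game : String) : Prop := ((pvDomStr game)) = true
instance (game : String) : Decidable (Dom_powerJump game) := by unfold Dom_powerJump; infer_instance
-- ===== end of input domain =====

-- B replaces A's single stateful scan by two phases (collect matching indices, then max gap); alternative decomposition, same cost.

-- ===== PORT A =====
def powerJump (game : String) : Int :=
  match PySem.Str.pyGet? game (-1) with
  | none => 0  -- unreachable under Pre_ (Python raises IndexError on empty string)
  | some tar =>
    ((PySem.List.enumerate game.toList 0).foldl
      (fun (st : Int × Int × Int) (q : Int × Char) =>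
        if q.2 == tar then (q.1 - st.2.1, q.1, max st.2.2 (q.1 - st.2.1)) else st)
      (0, -1, 1)).2.2

-- ===== PORT B =====
def powerJump_alt (game : String) : Int :=
  match PySem.Str.pyGet? game (-1) with
  | none => 0  -- unreachable under Pre_ (Python raises IndexError on empty string)
  | some tar =>
    let positions : List Int :=
      (PySem.List.enumerate game.toList 0).filterMap
        (fun q => if q.2 == tar then some q.1 else none)
    (List.zip ((-1) :: positions) positions).foldl
      (fun best pr => max best (pr.2 - pr.1)) 0

-- ===== PRECONDITION & SPEC =====
-- Pre_ excludes only the empty string, on which both Pythons raise IndexError at game[-1].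
def Pre_powerJump (game : String) : Prop := game.toList ≠ []
instance (game : String) : Decidable (Pre_powerJump game) := by unfold Pre_powerJump; infer_instance
def pvWitness_powerJump : String := "aba"

def Spec_powerJump (game : String) (out : Int) : Prop := out = powerJump_alt game
instance (game : String) (out : Int) : Decidable (Spec_powerJump game out) := by unfold Spec_powerJump; infer_instance

-- ===== CLAIM (what is proved, stated in full; the proofs are below) =====
def Claim_equal_powerJump : Prop := ∀ (game : String), Dom_powerJump game → Pre_powerJump game → Spec_powerJump game (powerJump game)

-- ===== LEMMAS AND PROOFS =====

-- the matching indices of l when enumeration starts at s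
def pjPos (tar : Char) (l : List Char) (s : Int) : List Int :=
  (PySem.List.enumerate l s).filterMap (fun q => if q.2 == tar then some q.1 else none)

-- consecutive differences with baseline s
def pjGaps : Int → List Int → List Int
  | _, [] => []
  | s, i :: t => (i - s) :: pjGaps i t

lemma pjPos_cons (tar c : Char) (t : List Char) (s : Int) :
    pjPos tar (c :: t) s =
      if c == tar then s :: pjPos tar t (s + 1) else pjPos tar t (s + 1) := by
  simp only [pjPos, PySem.List.enumerate_cons, List.filterMap_cons]
  by_cases h : c == tar <;> simp [h]

lemma foldA_eq_gaps (tar : Char) :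
    ∀ (l : List Char) (s d st p : Int),
      ((PySem.List.enumerate l s).foldl
        (fun (st : Int × Int × Int) (q : Int × Char) =>
          if q.2 == tar then (q.1 - st.2.1, q.1, max st.2.2 (q.1 - st.2.1)) else st)
        (d, st, p)).2.2
      = (pjGaps st (pjPos tar l s)).foldl max p := by
  intro l
  induction l with
  | nil => intro s d st p; simp [pjPos, PySem.List.enumerate_nil, pjGaps]
  | cons c t ih =>
    intro s d st p
    rw [PySem.List.enumerate_cons, pjPos_cons]
    by_cases h : c == tar
    · simp only [List.foldl_cons, h, if_pos trivial]
      rw [ih, pjGaps, List.foldl_cons]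
    · simp only [List.foldl_cons, h, if_false, Bool.false_eq_true]
      rw [ih]

lemma foldB_eq_gaps :
    ∀ (pos : List Int) (pr b : Int),
      (List.zip (pr :: pos) pos).foldl (fun best pr2 => max best (pr2.2 - pr2.1)) b
      = (pjGaps pr pos).foldl max b := by
  intro pos
  induction pos with
  | nil => intro pr b; simp [pjGaps]
  | cons i t ih =>
    intro pr b
    rw [List.zip_cons_cons, List.foldl_cons, ih, pjGaps, List.foldl_cons]

lemma pjPos_ne_nil (tar : Char) :
    ∀ (l : List Char) (s : Int), tar ∈ l → pjPos tar l s ≠ [] := by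
  intro l
  induction l with
  | nil => intro s h; simp at h
  | cons c t ih =>
    intro s h
    rw [pjPos_cons]
    by_cases hc : c == tar
    · simp [hc]
    · rcases List.mem_cons.mp h with h1 | h2
      · exact absurd (by simp [h1] : c == tar) hc
      · simpa [hc] using ih (s + 1) h2

lemma pjPos_head_ge (tar : Char) :
    ∀ (l : List Char) (s i : Int) (t : List Int), pjPos tar l s = i :: t → s ≤ i := by
  intro l
  induction l with
  | nil => intro s i t h; simp [pjPos, PySem.List.enumerate_nil] at h
  | cons c r ih =>
    intro s i t h
    rw [pjPos_cons] at h
    by_cases hc : c == tar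
    · rw [if_pos hc] at h
      injection h with h1 _
      omega
    · rw [if_neg hc] at h
      have := ih (s + 1) i t h
      omega

lemma max_gap_init (tar : Char) (l : List Char) (h : tar ∈ l) :
    (pjGaps (-1) (pjPos tar l 0)).foldl max 1 = (pjGaps (-1) (pjPos tar l 0)).foldl max 0 := by
  cases hp : pjPos tar l 0 with
  | nil => exact absurd hp (pjPos_ne_nil tar l 0 h)
  | cons i t =>
    have hi : (0:Int) ≤ i := pjPos_head_ge tar l 0 i t hp
    simp only [pjGaps, List.foldl_cons]
    have hm : max 1 (i - (-1)) = max 0 (i - (-1)) := by omega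
    rw [hm]

-- ===== VERDICT (by name: the statement is the Claim_ definition above) =====
theorem powerJump_spec : Claim_equal_powerJump := by
  intro game _ hpre
  have hl : game.toList ≠ [] := hpre
  have hget : PySem.Str.pyGet? game (-1) = some (game.toList.getLast hl) := by
    rw [show PySem.Str.pyGet? game (-1) = PySem.List.pyGet? game.toList (-1) from rfl,
      PySem.List.pyGet?_neg_one]
    exact List.getLast?_eq_some_getLast hl
  unfold Spec_powerJump powerJump powerJump_alt
  rw [hget]
  dsimp only
  rw [foldA_eq_gaps, foldB_eq_gaps]
  exact max_gap_init _ _ (List.getLast_mem hl)
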